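-- pv_equiv track=rewrite | github.com/mitmproxy/mitmproxy | mitmproxy/net/http/cookies.py | _has_special
-- ===== SOURCE A (Python) =====
-- def _has_special(s: str) -> bool:
--     for i in s:
--         if i in '",;\\':
--             return True
--         o = ord(i)
--         if o < 0x21 or o > 0x7e:
--             return True
--     return False
-- ===== SOURCE B (Python) =====
-- import re
--
-- _SPECIAL_RE = re.compile(r'[^\x21-\x7e]|[",;\\]')
--
-- def _has_special(s: str) -> bool:
--     return _SPECIAL_RE.search(s) is not None
-- ===== Notes on version B (the rewrite author's own statement) =====
-- stated objective: idiomatic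
-- what changed: Replaced the explicit per-character early-exit loop with a single precompiled regex search whose character class covers exactly the four literal specials and everything outside 0x21-0x7e.
import Mathlib
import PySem

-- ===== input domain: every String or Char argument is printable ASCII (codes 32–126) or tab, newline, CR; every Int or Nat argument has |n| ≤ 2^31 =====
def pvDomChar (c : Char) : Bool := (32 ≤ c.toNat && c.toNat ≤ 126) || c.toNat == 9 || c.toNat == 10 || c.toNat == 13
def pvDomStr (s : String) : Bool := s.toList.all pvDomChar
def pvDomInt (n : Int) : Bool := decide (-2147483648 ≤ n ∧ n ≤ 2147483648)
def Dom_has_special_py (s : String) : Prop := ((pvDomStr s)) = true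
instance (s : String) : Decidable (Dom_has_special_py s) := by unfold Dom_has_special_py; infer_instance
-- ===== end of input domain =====

-- B replaces A's explicit early-exit character loop with a single regex-style scan
-- for any character of the disallowed class (idiomatic; same O(n) cost).


-- ===== PORT A =====
-- the for-loop with early returns, as structural recursion over the characters
def hasSpecialLoop : List Char → Bool
  | [] => false
  | i :: rest =>
    if i = '"' ∨ i = ',' ∨ i = ';' ∨ i = '\\' then true
    else if i.toNat < 0x21 ∨ i.toNat > 0x7e then true
    else hasSpecialLoop rest

def has_special_py (s : String) : Bool := hasSpecialLoop s.toList

-- ===== PORT B =====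
-- regex character class [^\x21-\x7e]|[",;\] : one char matching it
def hsClass (c : Char) : Bool :=
  !(0x21 ≤ c.toNat && c.toNat ≤ 0x7e) || (c == '"' || c == ',' || c == ';' || c == '\\')

-- re.search(pattern, s) is not None  ⇔  some character of s matches the class
def has_special_py_alt (s : String) : Bool := s.toList.any hsClass

-- ===== PRECONDITION & SPEC =====
def Spec_has_special_py (s : String) (out : Bool) : Prop := out = has_special_py_alt s
instance (s : String) (out : Bool) : Decidable (Spec_has_special_py s out) := by unfold Spec_has_special_py; infer_instance

-- ===== CLAIM (what is proved, stated in full; the proofs are below) =====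
def Claim_equal_has_special_py : Prop := ∀ (s : String), Dom_has_special_py s → Spec_has_special_py s (has_special_py s)

-- ===== LEMMAS AND PROOFS =====
theorem hasSpecialLoop_eq_any (l : List Char) : hasSpecialLoop l = l.any hsClass := by
  induction l with
  | nil => rfl
  | cons c rest ih =>
    simp only [hasSpecialLoop, List.any_cons, ih]
    by_cases h1 : c = '"' ∨ c = ',' ∨ c = ';' ∨ c = '\\'
    · have hc : hsClass c = true := by rcases h1 with h | h | h | h <;> simp [hsClass, h]
      simp [h1, hc]
    · by_cases h2 : c.toNat < 0x21 ∨ c.toNat > 0x7e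
      · have hc : hsClass c = true := by simp [hsClass]; omega
        simp [h1, h2, hc]
      · have hc : hsClass c = false := by
          push_neg at h1 h2
          obtain ⟨a, b, cc, d⟩ := h1
          simp [hsClass, a, b, cc, d]; omega
        simp [h1, h2, hc]

-- ===== VERDICT (by name: the statement is the Claim_ definition above) =====
theorem has_special_py_spec : Claim_equal_has_special_py := by
  intro s _
  unfold Spec_has_special_py has_special_py has_special_py_alt
  exact hasSpecialLoop_eq_any s.toList
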